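-- pv_equiv track=rewrite | github.com/Tofmuck/FridaDev | app/observability/identity_observability.py | summarize_guard_filtered_entries
-- ===== SOURCE A (Python) =====
-- from typing import Any, Mapping, Sequence
--
-- def summarize_guard_filtered_entries(
--     filtered_entries: Sequence[Mapping[str, Any]],
-- ) -> tuple[dict[str, int], dict[str, list[str]]]:
--     counts = {'frida': 0, 'user': 0}
--     reason_codes_by_side: dict[str, list[str]] = {'frida': [], 'user': []}
--     seen_reason_codes: dict[str, set[str]] = {'frida': set(), 'user': set()}
--     for entry in filtered_entries:
--         subject = str(entry.get('subject') or '').strip().lower()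
--         side = 'frida' if subject == 'llm' else 'user' if subject == 'user' else None
--         if side is None:
--             continue
--         counts[side] += 1
--         reason_code = str(entry.get('reason') or '').strip()
--         if reason_code and reason_code not in seen_reason_codes[side]:
--             seen_reason_codes[side].add(reason_code)
--             reason_codes_by_side[side].append(reason_code)
--     return counts, reason_codes_by_side
-- ===== SOURCE B (Python) =====
-- def summarize_guard_filtered_entries(filtered_entries):
--     def classify(entry):
--         subject = str(entry.get('subject') or '').strip().lower()
--         if subject == 'llm':
--             return 'frida'
--         if subject == 'user':
--             return 'user'
--         return None
--
--     tagged = [(classify(e), str(e.get('reason') or '').strip()) for e in filtered_entries]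
--     counts = {s: sum(1 for side, _ in tagged if side == s) for s in ('frida', 'user')}
--     reasons = {s: list(dict.fromkeys(r for side, r in tagged if side == s and r))
--                for s in ('frida', 'user')}
--     return counts, reasons
-- ===== Notes on version B (the rewrite author's own statement) =====
-- stated objective: alternative
-- what changed: B replaces A's single accumulator loop (per-side counts, lists and seen-sets updated in one pass) by staged passes: it first maps every entry to a (side, stripped-reason) tag, then derives each side's count by filtering the tagged list and each side's reason list by filter + dict.fromkeys dedup.
import Mathlib
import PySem

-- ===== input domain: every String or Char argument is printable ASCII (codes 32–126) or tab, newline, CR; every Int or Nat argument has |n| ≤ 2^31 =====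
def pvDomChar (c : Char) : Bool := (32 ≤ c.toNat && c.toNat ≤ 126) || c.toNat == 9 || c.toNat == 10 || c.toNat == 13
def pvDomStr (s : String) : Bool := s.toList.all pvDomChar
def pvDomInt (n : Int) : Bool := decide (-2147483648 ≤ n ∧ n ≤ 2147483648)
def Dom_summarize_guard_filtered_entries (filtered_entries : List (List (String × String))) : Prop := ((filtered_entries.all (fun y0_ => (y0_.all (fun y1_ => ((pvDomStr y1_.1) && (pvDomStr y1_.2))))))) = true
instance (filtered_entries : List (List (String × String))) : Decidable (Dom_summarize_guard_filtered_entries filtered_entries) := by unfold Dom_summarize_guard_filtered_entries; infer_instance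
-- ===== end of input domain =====

-- B replaces A's one-pass accumulator loop (counts, lists and seen-sets) by staged passes:
-- tag every entry with (side, stripped reason), then count and collect per side by
-- filtering the tagged list (objective: alternative decomposition, no speed claim).

-- ===== PORT A =====
-- The fixed-key dicts ('frida'/'user') are represented as per-side components of the loop
-- state; output order frida-then-user is the dicts' fixed insertion order.
-- State: (counts['frida'], counts['user'], list_frida, seen_frida, list_user, seen_user)
def pvAStep (st : Int × Int × List String × PySem.Set String × List String × PySem.Set String)
    (entry : List (String × String)) :
    Int × Int × List String × PySem.Set String × List String × PySem.Set String :=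
  let subject := PySem.Str.lower (PySem.Str.strip ((PySem.Dict.get? ⟨entry⟩ "subject").getD ""))
  let side : Option String :=
    if subject == "llm" then some "frida" else if subject == "user" then some "user" else none
  match side with
  | none => st
  | some s =>
    let (cf, cu, lf, sf, lu, su) := st
    let reason := PySem.Str.strip ((PySem.Dict.get? ⟨entry⟩ "reason").getD "")
    if s == "frida" then
      if reason != "" && !(PySem.Set.contains sf reason) then
        (cf + 1, cu, lf ++ [reason], PySem.Set.add sf reason, lu, su)
      else (cf + 1, cu, lf, sf, lu, su)
    else
      if reason != "" && !(PySem.Set.contains su reason) then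
        (cf, cu + 1, lf, sf, lu ++ [reason], PySem.Set.add su reason)
      else (cf, cu + 1, lf, sf, lu, su)

def summarize_guard_filtered_entries (filtered_entries : List (List (String × String))) :
    (List (String × Int)) × (List (String × List String)) :=
  let st := filtered_entries.foldl pvAStep (0, 0, [], PySem.Set.empty, [], PySem.Set.empty)
  ([("frida", st.1), ("user", st.2.1)], [("frida", st.2.2.1), ("user", st.2.2.2.2.1)])

-- ===== PORT B =====
-- classify(entry): subject → side (or none)
def pvClassify (entry : List (String × String)) : Option String :=
  let subject := PySem.Str.lower (PySem.Str.strip ((PySem.Dict.get? ⟨entry⟩ "subject").getD ""))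
  if subject == "llm" then some "frida"
  else if subject == "user" then some "user"
  else none

-- tagged = [(classify(e), str(e.get('reason') or '').strip()) for e in filtered_entries]
def pvTag (filtered_entries : List (List (String × String))) : List (Option String × String) :=
  filtered_entries.map (fun e =>
    (pvClassify e, PySem.Str.strip ((PySem.Dict.get? ⟨e⟩ "reason").getD "")))

-- counts[s] = sum(1 for side, _ in tagged if side == s)
def pvCount (tagged : List (Option String × String)) (s : String) : Int :=
  ((tagged.filter (fun t => t.1 == some s)).length : Int)

-- reasons[s] = list(dict.fromkeys(r for side, r in tagged if side == s and r))
def pvReasons (tagged : List (Option String × String)) (s : String) : List String :=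
  PySem.List.dedup ((tagged.filter (fun t => t.1 == some s && t.2 != "")).map (·.2))

def summarize_guard_filtered_entries_alt (filtered_entries : List (List (String × String))) :
    (List (String × Int)) × (List (String × List String)) :=
  let tagged := pvTag filtered_entries
  ([("frida", pvCount tagged "frida"), ("user", pvCount tagged "user")],
   [("frida", pvReasons tagged "frida"), ("user", pvReasons tagged "user")])

-- ===== PRECONDITION & SPEC =====
def Spec_summarize_guard_filtered_entries (filtered_entries : List (List (String × String))) (out : (List (String × Int)) × (List (String × List String))) : Prop := out = summarize_guard_filtered_entries_alt filtered_entries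
instance (filtered_entries : List (List (String × String))) (out : (List (String × Int)) × (List (String × List String))) : Decidable (Spec_summarize_guard_filtered_entries filtered_entries out) := by unfold Spec_summarize_guard_filtered_entries; infer_instance

-- ===== CLAIM =====
def Claim_equal_summarize_guard_filtered_entries : Prop := ∀ (filtered_entries : List (List (String × String))), Dom_summarize_guard_filtered_entries filtered_entries → Spec_summarize_guard_filtered_entries filtered_entries (summarize_guard_filtered_entries filtered_entries)

-- ===== LEMMAS AND PROOFS =====

-- Loop invariant: A's fold over the remaining entries, started from a state whose per-side
-- (list, seen-set) pair is the dedup of a raw list, yields exactly B's staged counts and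
-- deduped filtered reason lists.
theorem pv_loop (fe : List (List (String × String))) :
    ∀ (cf cu : Int) (rf ru : List String),
      fe.foldl pvAStep (cf, cu, PySem.List.dedup rf, PySem.List.dedup rf,
                        PySem.List.dedup ru, PySem.List.dedup ru) =
        (cf + pvCount (pvTag fe) "frida", cu + pvCount (pvTag fe) "user",
         PySem.List.dedup (rf ++ (( (pvTag fe).filter (fun t => t.1 == some "frida" && t.2 != "")).map (·.2))),
         PySem.List.dedup (rf ++ (( (pvTag fe).filter (fun t => t.1 == some "frida" && t.2 != "")).map (·.2))),
         PySem.List.dedup (ru ++ (( (pvTag fe).filter (fun t => t.1 == some "user" && t.2 != "")).map (·.2))),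
         PySem.List.dedup (ru ++ (( (pvTag fe).filter (fun t => t.1 == some "user" && t.2 != "")).map (·.2)))) := by
  induction fe with
  | nil => intro cf cu rf ru; simp [pvTag, pvCount]
  | cons e rest ih =>
    intro cf cu rf ru
    simp only [List.foldl_cons]
    set subj := PySem.Str.lower (PySem.Str.strip ((PySem.Dict.get? ⟨e⟩ "subject").getD "")) with hsubj
    set r := PySem.Str.strip ((PySem.Dict.get? ⟨e⟩ "reason").getD "") with hr
    have htag : pvTag (e :: rest) = (pvClassify e, r) :: pvTag rest := by
      simp [pvTag, ← hr]
    by_cases h1 : subj == "llm"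
    · -- frida side
      have hcl : pvClassify e = some "frida" := by simp [pvClassify, ← hsubj, h1]
      have hA : pvAStep (cf, cu, PySem.List.dedup rf, PySem.List.dedup rf,
          PySem.List.dedup ru, PySem.List.dedup ru) e =
          (cf + 1, cu, PySem.List.dedup (if r != "" then rf ++ [r] else rf),
           PySem.List.dedup (if r != "" then rf ++ [r] else rf),
           PySem.List.dedup ru, PySem.List.dedup ru) := by
        by_cases hre : r != ""
        · by_cases hc : r ∈ rf
          · have hd : PySem.Set.ofList (rf ++ [r]) = PySem.Set.ofList rf := by
              simp [PySem.Set.ofList_append_singleton, PySem.Set.add, hc]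
            simp [pvAStep, ← hsubj, ← hr, h1, hre, hc, hd, PySem.List.dedup_eq_ofList]
          · have hd : PySem.Set.ofList (rf ++ [r]) = PySem.Set.ofList rf ++ [r] := by
              simp [PySem.Set.ofList_append_singleton, PySem.Set.add, hc]
            simp [pvAStep, ← hsubj, ← hr, h1, hre, hc, hd, PySem.Set.add,
              PySem.List.dedup_eq_ofList]
        · simp [pvAStep, ← hsubj, ← hr, h1, hre]
      rw [hA]
      by_cases hre : r != ""
      · rw [if_pos hre]
        rw [ih (cf + 1) cu (rf ++ [r]) ru]
        simp [htag, hcl, pvCount, hre]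
        omega
      · rw [if_neg hre]
        rw [ih (cf + 1) cu rf ru]
        simp at hre
        simp [htag, hcl, pvCount, hre]
        ring
    · by_cases h2 : subj == "user"
      · -- user side
        have hcl : pvClassify e = some "user" := by simp [pvClassify, ← hsubj, h1, h2]
        have hA : pvAStep (cf, cu, PySem.List.dedup rf, PySem.List.dedup rf,
            PySem.List.dedup ru, PySem.List.dedup ru) e =
            (cf, cu + 1, PySem.List.dedup rf, PySem.List.dedup rf,
             PySem.List.dedup (if r != "" then ru ++ [r] else ru),
             PySem.List.dedup (if r != "" then ru ++ [r] else ru)) := by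
          by_cases hre : r != ""
          · by_cases hc : r ∈ ru
            · have hd : PySem.Set.ofList (ru ++ [r]) = PySem.Set.ofList ru := by
                simp [PySem.Set.ofList_append_singleton, PySem.Set.add, hc]
              simp [pvAStep, ← hsubj, ← hr, h1, h2, hre, hc, hd, PySem.List.dedup_eq_ofList]
            · have hd : PySem.Set.ofList (ru ++ [r]) = PySem.Set.ofList ru ++ [r] := by
                simp [PySem.Set.ofList_append_singleton, PySem.Set.add, hc]
              simp [pvAStep, ← hsubj, ← hr, h1, h2, hre, hc, hd, PySem.Set.add,
                PySem.List.dedup_eq_ofList]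
          · simp [pvAStep, ← hsubj, ← hr, h1, h2, hre]
        rw [hA]
        by_cases hre : r != ""
        · rw [if_pos hre]
          rw [ih cf (cu + 1) rf (ru ++ [r])]
          simp [htag, hcl, pvCount, hre]
          omega
        · rw [if_neg hre]
          rw [ih cf (cu + 1) rf ru]
          simp at hre
          simp [htag, hcl, pvCount, hre]
          ring
      · -- no side
        have hcl : pvClassify e = none := by simp [pvClassify, ← hsubj, h1, h2]
        have hA : pvAStep (cf, cu, PySem.List.dedup rf, PySem.List.dedup rf,
            PySem.List.dedup ru, PySem.List.dedup ru) e =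
            (cf, cu, PySem.List.dedup rf, PySem.List.dedup rf,
             PySem.List.dedup ru, PySem.List.dedup ru) := by
          simp [pvAStep, ← hsubj, h1, h2]
        rw [hA, ih cf cu rf ru]
        simp [htag, hcl, pvCount]

-- ===== VERDICT =====
theorem summarize_guard_filtered_entries_spec : Claim_equal_summarize_guard_filtered_entries := by
  intro fe _
  show _ = _
  simp only [summarize_guard_filtered_entries, summarize_guard_filtered_entries_alt]
  have h := pv_loop fe 0 0 [] []
  have hinit : ((0 : Int), (0 : Int), ([] : List String), (PySem.Set.empty : PySem.Set String),
      ([] : List String), (PySem.Set.empty : PySem.Set String)) =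
      ((0 : Int), (0 : Int), PySem.List.dedup ([] : List String), PySem.List.dedup ([] : List String),
       PySem.List.dedup ([] : List String), PySem.List.dedup ([] : List String)) := rfl
  rw [hinit, h]
  simp [pvReasons]
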